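-- pv_equiv track=rewrite | github.com/Yanis3Pique/Kolakoski-s-Sequence | pythonProject/Kolakoski-visual-distribution.py | Kolakoski_sequence
-- ===== SOURCE A (Python) =====
-- def Kolakoski_sequence(n):
--     sequence = [1, 2, 2]
--     index = 2
--     while len(sequence) < n:
--         next_value = 1 if sequence[-1] == 2 else 2
--         sequence.extend([next_value] * sequence[index])
--         index += 1
--     return sequence[:n]
-- ===== SOURCE B (Python) =====
-- def Kolakoski_sequence(n):
--     # Iterated substitution: the Kolakoski sequence is the fixed point of the
--     # run-length decoding map (read each entry as a run length, values alternating
--     # 1,2,1,2,...).  Repeatedly decode the whole current prefix until it is long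
--     # enough, then truncate.
--     seq = [1, 2, 2]
--     while len(seq) < n:
--         out = []
--         v = 1
--         for r in seq:
--             out.extend([v] * r)
--             v = 3 - v
--         seq = out
--     return seq[:n]
-- ===== Notes on version B (the rewrite author's own statement) =====
-- stated objective: alternative
-- what changed: B computes the sequence by iterated substitution - repeatedly run-length-decoding the entire current prefix (Kolakoski is the fixed point of that map) until it is long enough - instead of A's single self-reading loop that extends the list run by run with an index pointer into itself.
import Mathlib
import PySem

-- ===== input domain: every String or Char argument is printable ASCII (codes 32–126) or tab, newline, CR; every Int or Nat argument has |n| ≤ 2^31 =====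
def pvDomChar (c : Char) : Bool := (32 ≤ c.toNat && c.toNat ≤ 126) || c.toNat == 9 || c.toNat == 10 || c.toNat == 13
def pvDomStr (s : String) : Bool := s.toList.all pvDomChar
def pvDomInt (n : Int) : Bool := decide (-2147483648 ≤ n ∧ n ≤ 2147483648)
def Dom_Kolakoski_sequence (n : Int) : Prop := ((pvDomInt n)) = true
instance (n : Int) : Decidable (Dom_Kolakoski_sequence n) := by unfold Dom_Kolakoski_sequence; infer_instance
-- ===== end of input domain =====

-- B builds the prefix by iterated substitution (repeatedly run-length-decoding the whole
-- current list; Kolakoski is the fixed point of that map) instead of A's self-reading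
-- extend-run-by-run loop with an index pointer into the growing list.

-- ===== PORT A =====
-- A's while loop, fueled: each iteration appends sequence[index] ∈ {1,2} ≥ 1 elements,
-- so fuel n.toNat is always enough (the loop stops once the length reaches n).
-- sequence[index] is always in range on reachable states (index < len is an invariant),
-- so the .getD 0 default of the IndexError case is never taken.
def kolA_loop (fuel : Nat) (n : Int) (seq : List Int) (index : Int) : List Int :=
  match fuel with
  | 0 => seq
  | fuel + 1 =>
    if (seq.length : Int) < n then
      let next : Int := if PySem.List.pyGet? seq (-1) = some 2 then 1 else 2
      let k := ((PySem.List.pyGet? seq index).getD 0).toNat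
      kolA_loop fuel n (seq ++ List.replicate k next) (index + 1)
    else seq

def Kolakoski_sequence (n : Int) : List Int :=
  PySem.List.slice (kolA_loop n.toNat n [1, 2, 2] 2) none (some n)

-- ===== PORT B =====
-- one decoding pass: `out = []; v = 1; for r in seq: out.extend([v]*r); v = 3 - v`
def kolDecode (s : List Int) : List Int :=
  (s.foldl (fun (acc : List Int × Int) r =>
    (acc.1 ++ List.replicate r.toNat acc.2, 3 - acc.2)) (([] : List Int), (1 : Int))).1

-- B's `while len(seq) < n: seq = decode(seq)`, fueled: each pass grows the list by at
-- least one element (it always contains a 2), so fuel n.toNat is always enough.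
def kolB_loop (fuel : Nat) (n : Int) (seq : List Int) : List Int :=
  match fuel with
  | 0 => seq
  | fuel + 1 =>
    if (seq.length : Int) < n then kolB_loop fuel n (kolDecode seq) else seq

def Kolakoski_sequence_alt (n : Int) : List Int :=
  PySem.List.slice (kolB_loop n.toNat n [1, 2, 2]) none (some n)

-- ===== PRECONDITION & SPEC =====
def Spec_Kolakoski_sequence (n : Int) (out : List Int) : Prop := out = Kolakoski_sequence_alt n
instance (n : Int) (out : List Int) : Decidable (Spec_Kolakoski_sequence n out) := by unfold Spec_Kolakoski_sequence; infer_instance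

-- ===== CLAIM =====
def Claim_equal_Kolakoski_sequence : Prop := ∀ (n : Int), Dom_Kolakoski_sequence n → Spec_Kolakoski_sequence n (Kolakoski_sequence n)

-- ===== LEMMAS AND PROOFS =====

-- the value of run number k when run 0 has value v (values alternate v, 3-v, v, …)
def kolVal (v : Int) (k : Nat) : Int := if k % 2 = 0 then v else 3 - v

-- positional form of the decoding pass
def dAux (v : Int) : List Int → List Int
  | [] => []
  | r :: rs => List.replicate r.toNat v ++ dAux (3 - v) rs

lemma kolVal_succ (v : Int) (k : Nat) : kolVal v (k + 1) = kolVal (3 - v) k := by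
  unfold kolVal
  rcases Nat.mod_two_eq_zero_or_one k with h | h <;> simp [h, Nat.add_mod]

lemma kolDecode_go (s : List Int) (acc : List Int) (v : Int) :
    (s.foldl (fun (acc : List Int × Int) r =>
      (acc.1 ++ List.replicate r.toNat acc.2, 3 - acc.2)) (acc, v)).1 = acc ++ dAux v s := by
  induction s generalizing acc v with
  | nil => simp [dAux]
  | cons r rs ih => simp [List.foldl, dAux, ih, List.append_assoc]

lemma kolDecode_eq (s : List Int) : kolDecode s = dAux 1 s := by
  simpa using kolDecode_go s [] 1

lemma dAux_append (v : Int) (s t : List Int) :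
    dAux v (s ++ t) = dAux v s ++ dAux (kolVal v s.length) t := by
  induction s generalizing v with
  | nil => simp [dAux, kolVal]
  | cons r rs ih =>
      simp [dAux, ih, kolVal_succ, List.append_assoc]

lemma dAux_prefix {s t : List Int} (v : Int) (h : s <+: t) : dAux v s <+: dAux v t := by
  obtain ⟨u, rfl⟩ := h
  rw [dAux_append]
  exact List.prefix_append _ _

lemma dAux_mem {v x : Int} (hv : v = 1 ∨ v = 2) {s : List Int} (hx : x ∈ dAux v s) :
    x = 1 ∨ x = 2 := by
  induction s generalizing v with
  | nil => simp [dAux] at hx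
  | cons r rs ih =>
      rcases List.mem_append.mp hx with h | h
      · rw [List.eq_of_mem_replicate h]; exact hv
      · exact ih (by rcases hv with h' | h' <;> simp [h']) h

lemma dAux_le_length (v : Int) {s : List Int} (hmem : ∀ r ∈ s, r = 1 ∨ r = 2) :
    s.length ≤ (dAux v s).length := by
  induction s generalizing v with
  | nil => simp [dAux]
  | cons r rs ih =>
      have hr : r = 1 ∨ r = 2 := hmem r (by simp)
      have := ih (3 - v) (fun x hx => hmem x (List.mem_cons_of_mem _ hx))
      have hr1 : 1 ≤ r.toNat := by rcases hr with h | h <;> simp [h]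
      simp only [dAux, List.length_append, List.length_replicate, List.length_cons]
      omega

lemma dAux_lt_length (v : Int) {s : List Int} (hmem : ∀ r ∈ s, r = 1 ∨ r = 2)
    (h2 : (2 : Int) ∈ s) : s.length < (dAux v s).length := by
  induction s generalizing v with
  | nil => simp at h2
  | cons r rs ih =>
      have hr : r = 1 ∨ r = 2 := hmem r (by simp)
      have hr1 : 1 ≤ r.toNat := by rcases hr with h | h <;> simp [h]
      rcases List.mem_cons.mp h2 with h | h
      · have := dAux_le_length (3 - v) (fun x hx => hmem x (List.mem_cons_of_mem _ hx))
        simp only [dAux, List.length_append, List.length_replicate, List.length_cons]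
        have : r.toNat = 2 := by rw [← h]; rfl
        omega
      · have := ih (3 - v) (fun x hx => hmem x (List.mem_cons_of_mem _ hx)) h
        simp only [dAux, List.length_append, List.length_replicate, List.length_cons]
        omega

lemma dAux_getLast? (v : Int) {p : List Int} (hne : p ≠ [])
    (hmem : ∀ r ∈ p, r = 1 ∨ r = 2) :
    (dAux v p).getLast? = some (kolVal v (p.length - 1)) := by
  induction p generalizing v with
  | nil => exact absurd rfl hne
  | cons r rs ih =>
      have hr : r = 1 ∨ r = 2 := hmem r (by simp)
      cases rs with
      | nil =>
          rcases hr with h | h <;> subst h <;> simp [dAux, kolVal]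
      | cons r' rs' =>
          have hmem' : ∀ x ∈ r' :: rs', x = 1 ∨ x = 2 := fun x hx => hmem x (by simp [hx])
          have hne2 : dAux (3 - v) (r' :: rs') ≠ [] := by
            have hr' : r' = 1 ∨ r' = 2 := hmem' r' (by simp)
            have : 1 ≤ r'.toNat := by rcases hr' with h | h <;> simp [h]
            simp only [dAux]
            intro hcontra
            have := congrArg List.length hcontra
            simp at this
            omega
          rw [dAux, List.getLast?_append_of_ne_nil _ hne2, ih (3 - v) (by simp) hmem']
          congr 1
          have : (r :: r' :: rs').length - 1 = ((r' :: rs').length - 1) + 1 := by simp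
          rw [this, kolVal_succ]

-- the substitution chain: Tch (k+1) = decode (Tch k); its prefixes converge to Kolakoski
def Tch : Nat → List Int
  | 0 => [1, 2]
  | k + 1 => dAux 1 (Tch k)

lemma Tch_prefix_succ (k : Nat) : Tch k <+: Tch (k + 1) := by
  induction k with
  | zero => decide
  | succ k ih => exact dAux_prefix 1 ih

lemma Tch_chain {k l : Nat} (h : k ≤ l) : Tch k <+: Tch l := by
  induction l with
  | zero => cases Nat.le_zero.mp h; exact List.prefix_rfl
  | succ l ih =>
      rcases Nat.lt_or_ge k (l + 1) with h' | h'
      · exact (ih (by omega)).trans (Tch_prefix_succ l)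
      · have : k = l + 1 := by omega
        subst this; exact List.prefix_rfl

lemma Tch_mem {x : Int} {k : Nat} (h : x ∈ Tch k) : x = 1 ∨ x = 2 := by
  induction k with
  | zero => simpa [Tch] using h
  | succ k ih => exact dAux_mem (Or.inl rfl) h

lemma Tch_two (k : Nat) : (2 : Int) ∈ Tch k :=
  (Tch_chain (Nat.zero_le k)).subset (by simp [Tch])

lemma Tch_len_succ (k : Nat) : (Tch k).length + 1 ≤ (Tch (k + 1)).length :=
  dAux_lt_length 1 (fun _ hr => Tch_mem hr) (Tch_two k)

lemma prefix_take_eq {u w : List Int} (h : u <+: w) {j : Nat} (hj : j ≤ u.length) :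
    u.take j = w.take j := by
  obtain ⟨t, rfl⟩ := h
  rw [List.take_append_of_le_length hj]

-- A's loop from a self-describing state lands inside the substitution chain
lemma kolA_main (fuel : Nat) (n : Int) :
    ∀ (seq : List Int) (idx k : Nat),
    seq = dAux 1 (seq.take idx) →
    seq.take 2 = [1, 2] →
    2 ≤ idx → idx ≤ seq.length →
    seq <+: Tch k →
    ∃ m, kolA_loop fuel n seq (idx : Int) <+: Tch m ∧
      (n ≤ (seq.length : Int) + fuel → n ≤ ((kolA_loop fuel n seq (idx : Int)).length : Int)) := by
  induction fuel with
  | zero =>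
      intro seq idx k _ _ _ _ hpre
      exact ⟨k, hpre, by intro h; simpa [kolA_loop] using h⟩
  | succ fuel ih =>
      intro seq idx k hself h2 hidx2 hidxle hpre
      by_cases hc : (seq.length : Int) < n
      · have hmem_seq : ∀ x ∈ seq, x = 1 ∨ x = 2 := fun x hx => Tch_mem (hpre.subset hx)
        have hmem_p : ∀ x ∈ seq.take idx, x = 1 ∨ x = 2 :=
          fun x hx => hmem_seq x (List.mem_of_mem_take hx)
        have hplen : (seq.take idx).length = idx := by
          rw [List.length_take]; omega
        have h2p : (2 : Int) ∈ seq.take idx := by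
          have ht : (seq.take idx).take 2 = [1, 2] := by
            rw [List.take_take, min_eq_left (by omega)]; exact h2
          exact List.take_subset 2 _ (ht ▸ (by simp : (2 : Int) ∈ ([1, 2] : List Int)))
        have hlt : idx < seq.length := by
          conv_rhs => rw [hself]
          have := dAux_lt_length 1 hmem_p h2p
          omega
        have hpne : seq.take idx ≠ [] := by
          intro h; rw [h] at hplen; simp at hplen; omega
        have hv : PySem.List.pyGet? seq (idx : Int) = some seq[idx] := by
          simp [List.getElem?_eq_getElem hlt]
        have hv12 : seq[idx] = 1 ∨ seq[idx] = 2 := hmem_seq _ (List.getElem_mem _)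
        have hlast : seq.getLast? = some (kolVal 1 (idx - 1)) := by
          conv_lhs => rw [hself]
          rw [dAux_getLast? 1 hpne hmem_p, hplen]
        have hnext : (if PySem.List.pyGet? seq (-1) = some 2 then (1 : Int) else 2)
            = kolVal 1 idx := by
          rw [PySem.List.pyGet?_neg_one, hlast]
          rcases Nat.mod_two_eq_zero_or_one idx with h | h
          · have h' : (idx - 1) % 2 = 1 := by omega
            simp [kolVal, h, h']
          · have h' : (idx - 1) % 2 = 0 := by omega
            simp [kolVal, h, h']
        set v : Int := seq[idx] with hvdef
        have hv1 : 1 ≤ v.toNat := by rcases hv12 with h | h <;> simp [h]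
        set seq' := seq ++ List.replicate v.toNat (kolVal 1 idx) with hseq'
        have htake1 : seq'.take (idx + 1) = seq.take idx ++ [v] := by
          rw [hseq', List.take_append_of_le_length (by omega), List.take_add_one,
            List.getElem?_eq_getElem hlt]
          rfl
        have hself' : seq' = dAux 1 (seq'.take (idx + 1)) := by
          rw [htake1, dAux_append, hplen, ← hself]
          simp [dAux, hseq']
        have h2' : seq'.take 2 = [1, 2] := by
          rw [hseq', List.take_append_of_le_length (by omega)]; exact h2
        have hpre' : seq' <+: Tch (k + 1) := by
          rw [hself']
          have : seq'.take (idx + 1) <+: Tch k := by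
            rw [htake1, ← List.take_succ_eq_append_getElem hlt]
            exact (List.take_prefix _ _).trans hpre
          exact dAux_prefix 1 this
        have hlen' : seq'.length = seq.length + v.toNat := by simp [hseq']
        have hcast : (idx : Int) + 1 = ((idx + 1 : Nat) : Int) := by push_cast; ring
        obtain ⟨m, hm, hl⟩ := ih seq' (idx + 1) (k + 1) hself' h2' (by omega)
          (by omega) hpre'
        refine ⟨m, ?_, ?_⟩
        · rw [kolA_loop]
          simp only [hc, if_pos, hnext, hv, Option.getD_some, hcast]
          exact hm
        · intro hn
          rw [kolA_loop]
          simp only [hc, if_pos, hnext, hv, Option.getD_some, hcast]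
          apply hl
          rw [hlen']
          push_cast at hn ⊢
          omega
      · refine ⟨k, ?_, ?_⟩ <;> rw [kolA_loop] <;> simp only [hc, if_false]
        · exact hpre
        · intro _; omega

-- B's loop stays on the substitution chain
lemma kolB_main (fuel : Nat) (n : Int) :
    ∀ k, ∃ m, kolB_loop fuel n (Tch (k + 1)) = Tch (m + 1) ∧
      (n ≤ ((Tch (k + 1)).length : Int) + fuel → n ≤ ((Tch (m + 1)).length : Int)) := by
  induction fuel with
  | zero => intro k; exact ⟨k, rfl, by intro h; simpa using h⟩
  | succ fuel ih =>
      intro k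
      by_cases hc : ((Tch (k + 1)).length : Int) < n
      · obtain ⟨m, hm, hl⟩ := ih (k + 1)
        have hdec : kolDecode (Tch (k + 1)) = Tch (k + 2) := by
          rw [kolDecode_eq]; rfl
        refine ⟨m, ?_, ?_⟩
        · simp only [kolB_loop, hc, if_pos, hdec]; exact hm
        · intro hn
          apply hl
          have := Tch_len_succ (k + 1)
          push_cast at hn ⊢
          omega
      · exact ⟨k, by simp [kolB_loop, hc], by intro _; omega⟩

-- ===== VERDICT =====
theorem Kolakoski_sequence_spec : Claim_equal_Kolakoski_sequence := by
  intro n _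
  show Kolakoski_sequence n = Kolakoski_sequence_alt n
  by_cases hn : n ≤ 3
  · by_cases h0 : n ≤ 0
    · have ht : n.toNat = 0 := by omega
      simp [Kolakoski_sequence, Kolakoski_sequence_alt, ht, kolA_loop, kolB_loop]
    · interval_cases n <;> decide
  · have h4 : 4 ≤ n := by omega
    have hcast2 : ((2 : Nat) : Int) = (2 : Int) := by norm_num
    obtain ⟨mA, hpA, hlA⟩ := kolA_main n.toNat n [1, 2, 2] 2 1 (by decide) (by decide)
      (by omega) (by simp) (by decide)
    obtain ⟨mB, hmB, hlB⟩ := kolB_main n.toNat n 0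
    have hT1 : Tch 1 = [1, 2, 2] := by decide
    rw [hT1] at hmB hlB
    rw [hcast2] at hpA hlA
    have hlen3 : (([1, 2, 2] : List Int).length : Int) = 3 := by decide
    have hfuel : n ≤ 3 + (n.toNat : Int) := by omega
    have hA' : n ≤ ((kolA_loop n.toNat n [1, 2, 2] 2).length : Int) := by
      apply hlA; rw [hlen3]; omega
    have hB' : n ≤ ((Tch (mB + 1)).length : Int) := by
      apply hlB; rw [hlen3]; omega
    unfold Kolakoski_sequence Kolakoski_sequence_alt
    rw [PySem.List.slice_to _ (by omega : (0:Int) ≤ n),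
      PySem.List.slice_to _ (by omega : (0:Int) ≤ n), hmB]
    have hM1 : kolA_loop n.toNat n [1, 2, 2] 2 <+: Tch (max mA (mB + 1)) :=
      hpA.trans (Tch_chain (le_max_left _ _))
    have hM2 : Tch (mB + 1) <+: Tch (max mA (mB + 1)) := Tch_chain (le_max_right _ _)
    rw [prefix_take_eq hM1 (by omega), prefix_take_eq hM2 (by omega)]
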